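-- pv_equiv track=rewrite | github.com/navig-run/core | navig/gateway/approvals.py | decode_callback
-- ===== SOURCE A (Python) =====
-- APPROVAL_PREFIX = "_appr_"
--
-- _ACTION_OK = "ok"
--
-- _ACTION_NO = "no"
--
-- def decode_callback(data: str) -> tuple[str, str] | None:
--     """
--     Parse a callback_data string.
--
--     Returns ``(action, approval_id)`` or ``None`` if not an approval callback.
--
--     >>> ApprovalStore.decode_callback("_appr_ok_abc-123")
--     ('ok', 'abc-123')
--     >>> ApprovalStore.decode_callback("something_else") is None
--     True
--     """
--     if not data.startswith(APPROVAL_PREFIX):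
--         return None
--     rest = data[len(APPROVAL_PREFIX):]
--     # rest = "ok_<uuid>" or "no_<uuid>"
--     for action in (_ACTION_OK, _ACTION_NO):
--         prefix = f"{action}_"
--         if rest.startswith(prefix):
--             return action, rest[len(prefix):]
--     return None
-- ===== SOURCE B (Python) =====
-- _HEADS = {"_appr_ok_": "ok", "_appr_no_": "no"}
--
--
-- def decode_callback(data: str):
--     """Table-driven parse: a valid approval callback is exactly one of two fixed
--     9-character heads followed by the approval id, so look the whole head up at once."""
--     action = _HEADS.get(data[:9])
--     if action is None:
--         return None
--     return action, data[9:]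
-- ===== Notes on version B (the rewrite author's own statement) =====
-- stated objective: simpler
-- what changed: B replaces A's prefix-strip plus loop over action prefixes by a single fixed-width slice of the first 9 characters looked up in a precomputed table of the two complete valid heads; no startswith, no loop, no second slice of a stripped remainder.
import Mathlib
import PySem

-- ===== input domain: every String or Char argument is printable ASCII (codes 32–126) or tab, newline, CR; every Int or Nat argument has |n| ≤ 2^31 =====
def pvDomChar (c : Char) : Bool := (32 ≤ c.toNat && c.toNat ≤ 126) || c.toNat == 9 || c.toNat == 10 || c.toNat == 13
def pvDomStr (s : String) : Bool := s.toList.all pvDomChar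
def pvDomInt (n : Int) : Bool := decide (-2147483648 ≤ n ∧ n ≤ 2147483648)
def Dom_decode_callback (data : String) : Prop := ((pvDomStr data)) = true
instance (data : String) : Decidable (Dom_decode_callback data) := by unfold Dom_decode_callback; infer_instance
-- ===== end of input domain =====

-- B looks the whole fixed-width 9-character head up in a precomputed table of the two complete
-- valid heads instead of A's prefix-strip plus loop over action prefixes (simpler decomposition; same cost).


-- ===== PORT A =====
-- the 'for action in (_ACTION_OK, _ACTION_NO)' loop, over char lists
def pvLoopA : List (List Char) → List Char → Option (List Char × List Char)
  | [], _ => none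
  | a :: as, rest =>
    let p := a ++ ['_']                                               -- f"{action}_"
    if PySem.Chars.startswith rest p then
      some (a, PySem.Chars.slice rest (some (p.length : Int)) none)   -- rest[len(prefix):]
    else pvLoopA as rest

def decode_callback (data : String) : Option (String × String) :=
  let cs := data.toList
  if ¬ PySem.Chars.startswith cs "_appr_".toList then none
  else
    let rest := PySem.Chars.slice cs (some (6 : Int)) none            -- data[len(APPROVAL_PREFIX):]
    (pvLoopA ["ok".toList, "no".toList] rest).map
      (fun p => (String.ofList p.1, String.ofList p.2))

-- ===== PORT B =====
-- _HEADS = {"_appr_ok_": "ok", "_appr_no_": "no"}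
def pvHeads : PySem.Dict String String :=
  PySem.Dict.ofList [("_appr_ok_", "ok"), ("_appr_no_", "no")]

def decode_callback_alt (data : String) : Option (String × String) :=
  let cs := data.toList
  match pvHeads.get? (String.ofList (PySem.Chars.slice cs none (some (9 : Int)))) with  -- _HEADS.get(data[:9])
  | none => none
  | some action => some (action, String.ofList (PySem.Chars.slice cs (some (9 : Int)) none))  -- data[9:]

-- ===== PRECONDITION & SPEC =====
def Spec_decode_callback (data : String) (out : Option (String × String)) : Prop := out = decode_callback_alt data
instance (data : String) (out : Option (String × String)) : Decidable (Spec_decode_callback data out) := by unfold Spec_decode_callback; infer_instance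

-- ===== CLAIM (what is proved, stated in full; the proofs are below) =====
def Claim_equal_decode_callback : Prop := ∀ (data : String), Dom_decode_callback data → Spec_decode_callback data (decode_callback data)

-- ===== LEMMAS AND PROOFS =====

-- splitting the 9-char head at position 6
lemma pv_take9_split (cs p6 q3 : List Char) (h6 : p6.length = 6) :
    cs.take 9 = p6 ++ q3 ↔ cs.take 6 = p6 ∧ (cs.drop 6).take 3 = q3 := by
  constructor
  · intro h
    have t6 : cs.take 6 = (cs.take 9).take 6 := by simp [List.take_take]
    have d6 : (cs.drop 6).take 3 = (cs.take 9).drop 6 := by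
      rw [List.drop_take]
    constructor
    · rw [t6, h, ← h6, List.take_left]
    · rw [d6, h, ← h6, List.drop_left]
  · rintro ⟨h1, h2⟩
    rw [show (9 : Nat) = 6 + 3 from rfl, List.take_add, h1, h2]

-- A's two-prefix loop, unfolded on its literal action list
lemma pvLoopA_two (rest : List Char) :
    pvLoopA ["ok".toList, "no".toList] rest =
      (if PySem.Chars.startswith rest ['o', 'k', '_'] then
        some (['o', 'k'], PySem.Chars.slice rest (some (3 : Int)) none)
      else if PySem.Chars.startswith rest ['n', 'o', '_'] then
        some (['n', 'o'], PySem.Chars.slice rest (some (3 : Int)) none)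
      else none) := rfl

-- A's result characterized by the first 9 characters
lemma pv_A_char (cs : List Char) :
    (if ¬ PySem.Chars.startswith cs "_appr_".toList then none
     else (pvLoopA ["ok".toList, "no".toList] (PySem.Chars.slice cs (some (6 : Int)) none)).map
       (fun p => (String.ofList p.1, String.ofList p.2)))
    = (if cs.take 9 = ['_', 'a', 'p', 'p', 'r', '_', 'o', 'k', '_'] then
         some ("ok", String.ofList (cs.drop 9))
       else if cs.take 9 = ['_', 'a', 'p', 'p', 'r', '_', 'n', 'o', '_'] then
         some ("no", String.ofList (cs.drop 9))
       else none) := by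
  have hsw : ∀ (xs p : List Char), PySem.Chars.startswith xs p = true ↔ xs.take p.length = p := by
    intro xs p
    rw [PySem.Chars.startswith_iff, List.prefix_iff_eq_take]
    exact ⟨fun h => h.symm, fun h => h.symm⟩
  have hok : cs.take 9 = ['_', 'a', 'p', 'p', 'r', '_', 'o', 'k', '_'] ↔
      cs.take 6 = ['_', 'a', 'p', 'p', 'r', '_'] ∧ (cs.drop 6).take 3 = ['o', 'k', '_'] :=
    pv_take9_split cs ['_', 'a', 'p', 'p', 'r', '_'] ['o', 'k', '_'] (by decide)
  have hno : cs.take 9 = ['_', 'a', 'p', 'p', 'r', '_', 'n', 'o', '_'] ↔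
      cs.take 6 = ['_', 'a', 'p', 'p', 'r', '_'] ∧ (cs.drop 6).take 3 = ['n', 'o', '_'] :=
    pv_take9_split cs ['_', 'a', 'p', 'p', 'r', '_'] ['n', 'o', '_'] (by decide)
  have hslice6 : PySem.Chars.slice cs (some (6 : Int)) none = cs.drop 6 := by
    rw [PySem.Chars.slice_eq_listSlice,
      show ((6 : Int)) = ((6 : Nat) : Int) from rfl, PySem.List.slice_from_natCast]
  have hslice3 : PySem.Chars.slice (cs.drop 6) (some (3 : Int)) none = cs.drop 9 := by
    rw [PySem.Chars.slice_eq_listSlice,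
      show ((3 : Int)) = ((3 : Nat) : Int) from rfl, PySem.List.slice_from_natCast,
      List.drop_drop]
  rw [hslice6, pvLoopA_two]
  by_cases h6 : cs.take 6 = ['_', 'a', 'p', 'p', 'r', '_']
  · have hs6 : PySem.Chars.startswith cs "_appr_".toList = true := (hsw _ _).mpr h6
    rw [if_neg (not_not_intro hs6)]
    by_cases hko : (cs.drop 6).take 3 = ['o', 'k', '_']
    · have sko : PySem.Chars.startswith (cs.drop 6) ['o', 'k', '_'] = true :=
        (hsw _ _).mpr (by simpa using hko)
      rw [if_pos sko, hslice3, if_pos (hok.mpr ⟨h6, hko⟩)]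
      rfl
    · have n1 : ¬ cs.take 9 = ['_', 'a', 'p', 'p', 'r', '_', 'o', 'k', '_'] :=
        fun h => hko (hok.mp h).2
      have sko : ¬ PySem.Chars.startswith (cs.drop 6) ['o', 'k', '_'] = true :=
        fun h => hko (by simpa using (hsw _ _).mp h)
      rw [if_neg sko, if_neg n1]
      by_cases hkn : (cs.drop 6).take 3 = ['n', 'o', '_']
      · have skn : PySem.Chars.startswith (cs.drop 6) ['n', 'o', '_'] = true :=
          (hsw _ _).mpr (by simpa using hkn)
        rw [if_pos skn, hslice3, if_pos (hno.mpr ⟨h6, hkn⟩)]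
        rfl
      · have n2 : ¬ cs.take 9 = ['_', 'a', 'p', 'p', 'r', '_', 'n', 'o', '_'] :=
          fun h => hkn (hno.mp h).2
        have skn : ¬ PySem.Chars.startswith (cs.drop 6) ['n', 'o', '_'] = true :=
          fun h => hkn (by simpa using (hsw _ _).mp h)
        rw [if_neg skn, if_neg n2]
        rfl
  · have hs6 : ¬ PySem.Chars.startswith cs "_appr_".toList = true := fun h => h6 ((hsw _ _).mp h)
    have n1 : ¬ cs.take 9 = ['_', 'a', 'p', 'p', 'r', '_', 'o', 'k', '_'] :=
      fun h => h6 (hok.mp h).1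
    have n2 : ¬ cs.take 9 = ['_', 'a', 'p', 'p', 'r', '_', 'n', 'o', '_'] :=
      fun h => h6 (hno.mp h).1
    rw [if_pos hs6, if_neg n1, if_neg n2]

-- B's result characterized by the first 9 characters
lemma pv_B_char (cs : List Char) :
    (match pvHeads.get? (String.ofList (PySem.Chars.slice cs none (some (9 : Int)))) with
     | none => none
     | some action => some (action, String.ofList (PySem.Chars.slice cs (some (9 : Int)) none)))
    = (if cs.take 9 = ['_', 'a', 'p', 'p', 'r', '_', 'o', 'k', '_'] then
         some ("ok", String.ofList (cs.drop 9))
       else if cs.take 9 = ['_', 'a', 'p', 'p', 'r', '_', 'n', 'o', '_'] then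
         some ("no", String.ofList (cs.drop 9))
       else none) := by
  have hsl9 : PySem.Chars.slice cs none (some (9 : Int)) = cs.take 9 := by
    simp [PySem.Chars.slice_eq_listSlice]
    rw [show ((9 : Int)) = ((9 : Nat) : Int) from rfl, PySem.List.slice_to_natCast]
  have hdr9 : PySem.Chars.slice cs (some (9 : Int)) none = cs.drop 9 := by
    simp [PySem.Chars.slice_eq_listSlice]
    rw [show ((9 : Int)) = ((9 : Nat) : Int) from rfl, PySem.List.slice_from_natCast]
  have hmk : pvHeads = PySem.Dict.mk [("_appr_ok_", "ok"), ("_appr_no_", "no")] := by decide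
  have e1 : String.ofList ['_', 'a', 'p', 'p', 'r', '_', 'o', 'k', '_'] = "_appr_ok_" := by decide
  have e2 : String.ofList ['_', 'a', 'p', 'p', 'r', '_', 'n', 'o', '_'] = "_appr_no_" := by decide
  have g1 : pvHeads.get? "_appr_ok_" = some "ok" := by decide
  have g2 : pvHeads.get? "_appr_no_" = some "no" := by decide
  rw [hsl9, hdr9]
  by_cases h1 : cs.take 9 = ['_', 'a', 'p', 'p', 'r', '_', 'o', 'k', '_']
  · rw [h1, e1, g1]; simp
  · by_cases h2 : cs.take 9 = ['_', 'a', 'p', 'p', 'r', '_', 'n', 'o', '_']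
    · rw [h2, e2, g2]; simp
    · have k1 : ("_appr_ok_" == String.ofList (cs.take 9)) = false := by
        rw [beq_eq_false_iff_ne]
        intro h; exact h1 (by simpa using congrArg String.toList h.symm)
      have k2 : ("_appr_no_" == String.ofList (cs.take 9)) = false := by
        rw [beq_eq_false_iff_ne]
        intro h; exact h2 (by simpa using congrArg String.toList h.symm)
      rw [hmk]
      simp [PySem.Dict.get?, k1, k2, h1, h2]

-- ===== VERDICT (by name: the statement is the Claim_ definition above) =====
theorem decode_callback_spec : Claim_equal_decode_callback := by
  intro data _
  unfold Spec_decode_callback decode_callback decode_callback_alt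
  rw [pv_A_char data.toList, pv_B_char data.toList]
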